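-- pv_equiv track=rewrite | github.com/NTU-MedAI/MolGramTreeNet | dataloader/data_process_toxcast.py | construct_input_from_tokenseq
-- ===== SOURCE A (Python) =====
-- def construct_input_from_tokenseq(token_list, max_len=1000):
--     grammer_token_list = list(range(1, 81))
--     all_token_list = ['[PAD]', '[GLO]'] + grammer_token_list
--     word2idx = {'[PAD]': 0, '[GLO]': 82}
--
--     if len(token_list) > max_len:
--         token_list = token_list[:max_len]
--
--     padding_list = ['[PAD]'] * (max_len - len(token_list))
--     tokens = ['[GLO]'] + token_list + padding_list
--
--     tokens_idx = []
--     atom_mask_list = []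
--
--     for token in tokens:
--         if token in grammer_token_list:
--             atom_mask_list.append(1)
--             tokens_idx.append(token)
--         elif token == '[GLO]':
--             atom_mask_list.append(1)
--             tokens_idx.append(word2idx['[GLO]'])
--         else:
--             atom_mask_list.append(0)
--             tokens_idx.append(0)
--
--     return tokens_idx, atom_mask_list
-- ===== SOURCE B (Python) =====
-- def construct_input_from_tokenseq(token_list, max_len=1000):
--     # Preallocate zero-filled outputs of the final length and scatter-write
--     # only the positions that carry a grammar token (plus the fixed [GLO] head);
--     # padding and non-grammar zeros come for free from the initialization.
--     n = len(token_list)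
--     if n > max_len:
--         n = max_len
--     tokens_idx = [0] * (max_len + 1)
--     atom_mask_list = [0] * (max_len + 1)
--     tokens_idx[0] = 82
--     atom_mask_list[0] = 1
--     for i in range(n):
--         t = token_list[i]
--         if 1 <= t <= 80:
--             tokens_idx[i + 1] = t
--             atom_mask_list[i + 1] = 1
--     return tokens_idx, atom_mask_list
-- ===== Notes on version B (the rewrite author's own statement) =====
-- stated objective: faster
-- what changed: B preallocates the two output arrays as zeros of the final length max_len+1 and scatter-writes in place only the [GLO] head and the grammar-token positions (range test 1<=t<=80), so A's combined ['[GLO]']+body+padding list, its per-token 80-element membership scan and its append loop all disappear.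
-- outside the precondition, e.g. on construct_input_from_tokenseq([1], -1): A returns ([82], [1]), B raises IndexError
import Mathlib
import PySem

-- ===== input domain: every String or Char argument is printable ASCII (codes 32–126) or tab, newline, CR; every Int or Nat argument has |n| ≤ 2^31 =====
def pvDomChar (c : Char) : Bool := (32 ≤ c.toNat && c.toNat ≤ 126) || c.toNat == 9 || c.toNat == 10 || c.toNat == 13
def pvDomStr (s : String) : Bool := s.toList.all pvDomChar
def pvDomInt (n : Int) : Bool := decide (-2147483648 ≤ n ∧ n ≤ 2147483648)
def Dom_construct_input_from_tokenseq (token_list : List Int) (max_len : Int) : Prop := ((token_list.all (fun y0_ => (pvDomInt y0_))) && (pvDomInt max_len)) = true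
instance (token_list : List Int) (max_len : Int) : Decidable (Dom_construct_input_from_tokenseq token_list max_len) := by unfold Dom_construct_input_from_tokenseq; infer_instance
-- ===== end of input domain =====

-- B preallocates zero-filled outputs of the final length and scatter-writes only the head and the grammar-token positions, instead of A's combined list + append loop (objective: faster by a constant factor: no per-token 80-element membership scan).

-- ===== PORT A =====
-- heterogeneous elements of A's 'tokens' list: '[PAD]', '[GLO]', or an int
inductive PyTok
| pad
| glo
| num : Int → PyTok
deriving DecidableEq, Repr

def pvStepA (grammer_token_list : List Int) (acc : List Int × List Int) (token : PyTok) : List Int × List Int :=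
  match token with
  | .num t =>
    if t ∈ grammer_token_list then (acc.1 ++ [t], acc.2 ++ [1])
    else (acc.1 ++ [0], acc.2 ++ [0])
  | .glo => (acc.1 ++ [82], acc.2 ++ [1])
  | .pad => (acc.1 ++ [0], acc.2 ++ [0])

def construct_input_from_tokenseq (token_list : List Int) (max_len : Int) : List Int × List Int :=
  let grammer_token_list := PySem.List.pyRange 1 81 1
  let token_list := if (token_list.length : Int) > max_len then PySem.List.slice token_list none (some max_len) else token_list
  let padding_list : List PyTok := List.replicate (max_len - (token_list.length : Int)).toNat .pad
  let tokens : List PyTok := [PyTok.glo] ++ token_list.map PyTok.num ++ padding_list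
  tokens.foldl (pvStepA grammer_token_list) ([], [])

-- ===== PORT B =====
def pvScatter (token_list : List Int) (acc : List Int × List Int) (i : Int) : List Int × List Int :=
  -- token_list[i]: i is produced by range(n) with n ≤ len(token_list), so always in range
  let t := PySem.List.pyGetD token_list i 0
  if 1 ≤ t ∧ t ≤ 80 then (acc.1.set (i + 1).toNat t, acc.2.set (i + 1).toNat 1) else acc

def construct_input_from_tokenseq_alt (token_list : List Int) (max_len : Int) : List Int × List Int :=
  let n := if (token_list.length : Int) > max_len then max_len else (token_list.length : Int)
  let tokens_idx := (List.replicate (max_len + 1).toNat (0 : Int)).set 0 82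
  let atom_mask_list := (List.replicate (max_len + 1).toNat (0 : Int)).set 0 1
  (PySem.List.pyRange 0 n 1).foldl (pvScatter token_list) (tokens_idx, atom_mask_list)

-- ===== PRECONDITION & SPEC =====
-- Pre_ excludes negative max_len, on which A still returns (its negative-slice truncation yields an output shorter than max_len) but B's preallocated arrays of length max_len+1 cannot be built and B raises IndexError.
def Pre_construct_input_from_tokenseq (token_list : List Int) (max_len : Int) : Prop := 0 ≤ max_len
instance (token_list : List Int) (max_len : Int) : Decidable (Pre_construct_input_from_tokenseq token_list max_len) := by unfold Pre_construct_input_from_tokenseq; infer_instance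

def pvWitness_construct_input_from_tokenseq : List Int × Int := ([3, 99, -1], 5)

def Spec_construct_input_from_tokenseq (token_list : List Int) (max_len : Int) (out : List Int × List Int) : Prop := out = construct_input_from_tokenseq_alt token_list max_len
instance (token_list : List Int) (max_len : Int) (out : List Int × List Int) : Decidable (Spec_construct_input_from_tokenseq token_list max_len out) := by unfold Spec_construct_input_from_tokenseq; infer_instance

-- ===== CLAIM (what is proved, stated in full; the proofs are below) =====
def Claim_equal_construct_input_from_tokenseq : Prop := ∀ (token_list : List Int) (max_len : Int), Dom_construct_input_from_tokenseq token_list max_len → Pre_construct_input_from_tokenseq token_list max_len → Spec_construct_input_from_tokenseq token_list max_len (construct_input_from_tokenseq token_list max_len)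

-- ===== LEMMAS AND PROOFS =====
lemma pvFoldNum (l : List Int) (a1 a2 : List Int) :
    (l.map PyTok.num).foldl (pvStepA (PySem.List.pyRange 1 81 1)) (a1, a2)
      = (a1 ++ l.map (fun t => if 1 ≤ t ∧ t ≤ 80 then t else 0),
         a2 ++ l.map (fun t => if 1 ≤ t ∧ t ≤ 80 then (1 : Int) else 0)) := by
  induction l generalizing a1 a2 with
  | nil => simp
  | cons t l ih =>
    have hmem : (t ∈ PySem.List.pyRange 1 81 1) ↔ (1 ≤ t ∧ t ≤ 80) := by
      rw [PySem.List.mem_pyRange_one]; omega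
    simp only [List.map_cons, List.foldl_cons, pvStepA]
    by_cases h : 1 ≤ t ∧ t ≤ 80
    · rw [if_pos (hmem.mpr h), ih]; simp [h]
    · rw [if_neg (fun hm => h (hmem.mp hm)), ih]; simp [h]

lemma pvFoldPad (n : Nat) (a1 a2 : List Int) :
    (List.replicate n PyTok.pad).foldl (pvStepA (PySem.List.pyRange 1 81 1)) (a1, a2)
      = (a1 ++ List.replicate n 0, a2 ++ List.replicate n 0) := by
  induction n generalizing a1 a2 with
  | zero => simp
  | succ n ih => simp only [List.replicate_succ, List.foldl_cons, pvStepA, ih]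
                 simp

-- B's scatter loop, run for k steps, fills the first k body slots of the zero arrays.
lemma pvScatterFold (token_list : List Int) (M k : Nat)
    (hk1 : k ≤ token_list.length) (hk2 : k ≤ M) :
    (PySem.List.pyRange 0 (k : Int) 1).foldl (pvScatter token_list)
      (82 :: List.replicate M 0, 1 :: List.replicate M 0)
    = (82 :: (token_list.take k).map (fun t => if 1 ≤ t ∧ t ≤ 80 then t else 0)
           ++ List.replicate (M - k) 0,
       1 :: (token_list.take k).map (fun t => if 1 ≤ t ∧ t ≤ 80 then (1 : Int) else 0)
           ++ List.replicate (M - k) 0) := by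
  induction k with
  | zero => simp
  | succ k ih =>
    have hk1' : k ≤ token_list.length := Nat.le_of_succ_le hk1
    have hk2' : k ≤ M := Nat.le_of_succ_le hk2
    have hsplit : PySem.List.pyRange 0 ((k + 1 : Nat) : Int) 1
        = PySem.List.pyRange 0 (k : Int) 1 ++ [(k : Int)] := by
      push_cast
      exact PySem.List.pyRange_one_succ_right (by omega)
    have hget : PySem.List.pyGetD token_list (k : Int) 0 = token_list[k]'(by omega) := by
      rw [PySem.List.pyGetD_natCast]
      exact List.getD_eq_getElem _ _ (by omega)
    have htake : token_list.take (k + 1)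
        = token_list.take k ++ [token_list[k]'(by omega)] := by
      rw [List.take_add_one, List.getElem?_eq_getElem (by omega)]
      rfl
    have hlenmap : ∀ (f : Int → Int), ((token_list.take k).map f).length = k := by
      intro f; simp [List.length_take, Nat.min_eq_left hk1']
    have hrep : List.replicate (M - k) (0 : Int)
        = 0 :: List.replicate (M - (k + 1)) 0 := by
      have : M - k = (M - (k + 1)) + 1 := by omega
      rw [this, List.replicate_succ]
    rw [hsplit, List.foldl_append, ih hk1' hk2']
    simp only [List.foldl_cons, List.foldl_nil, pvScatter, hget]
    set t := token_list[k]'(by omega) with ht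
    by_cases h : 1 ≤ t ∧ t ≤ 80
    · rw [if_pos h]
      have hset : ∀ (f : Int → Int) (v : Int),
          ((82 + (v - 82)) :: ((token_list.take k).map f ++ List.replicate (M - k) 0)).set
            ((k : Int) + 1).toNat (f t)
          = (82 + (v - 82)) :: ((token_list.take (k + 1)).map f ++ List.replicate (M - (k + 1)) 0) := by
        intro f v
        have hidx : ((k : Int) + 1).toNat = k + 1 := by omega
        rw [hidx, List.set_cons_succ, hrep, htake]
        congr 1
        rw [List.map_append, List.append_assoc]
        rw [List.set_append_right _ _ (by rw [hlenmap]), hlenmap]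
        simp
      have h1 := hset (fun t => if 1 ≤ t ∧ t ≤ 80 then t else 0) 82
      have h2 := hset (fun t => if 1 ≤ t ∧ t ≤ 80 then (1 : Int) else 0) (-81)
      simp only [show (82 : Int) + (82 - 82) = 82 by ring, show (82 : Int) + (-81 - 82) = -81 by ring] at h1 h2
      simp only [if_pos h] at h1 h2
      exact Prod.ext (by simpa using h1) (by simpa using h2)
    · rw [if_neg h]
      rw [htake, hrep]
      simp [h, List.append_assoc]

-- ===== VERDICT (by name: the statement is the Claim_ definition above) =====
theorem construct_input_from_tokenseq_spec : Claim_equal_construct_input_from_tokenseq := by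
  intro token_list max_len _ hpre
  unfold Pre_construct_input_from_tokenseq at hpre
  unfold Spec_construct_input_from_tokenseq construct_input_from_tokenseq construct_input_from_tokenseq_alt
  simp only []
  -- the truncated body and its lengths
  by_cases hlen : (token_list.length : Int) > max_len
  · -- body = take max_len.toNat, no padding
    rw [if_pos hlen, if_pos hlen]
    rw [PySem.List.slice_to _ hpre]
    set M := max_len.toNat with hM
    have hMle : M ≤ token_list.length := by omega
    have hlen' : (token_list.take M).length = M := by
      simp [List.length_take, Nat.min_eq_left hMle]
    have hpad : (max_len - ((token_list.take M).length : Int)).toNat = 0 := by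
      rw [hlen']; omega
    have hinit : (List.replicate (max_len + 1).toNat (0 : Int)).set 0 82
        = 82 :: List.replicate M (0 : Int) := by
      have : (max_len + 1).toNat = M + 1 := by omega
      rw [this, List.replicate_succ, List.set_cons_zero]
    have hinit2 : (List.replicate (max_len + 1).toNat (0 : Int)).set 0 1
        = 1 :: List.replicate M (0 : Int) := by
      have : (max_len + 1).toNat = M + 1 := by omega
      rw [this, List.replicate_succ, List.set_cons_zero]
    have hcast : max_len = ((M : Nat) : Int) := by omega
    rw [hpad, hinit, hinit2, hcast]
    rw [pvScatterFold token_list M M hMle (le_refl M)]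
    simp only [List.foldl_append, List.foldl_cons, List.foldl_nil, pvStepA,
      pvFoldNum, pvFoldPad]
    simp
  · -- body = token_list, padding of length max_len - len
    rw [if_neg hlen, if_neg hlen]
    set M := max_len.toNat with hM
    have hle : token_list.length ≤ M := by omega
    have hinit : (List.replicate (max_len + 1).toNat (0 : Int)).set 0 82
        = 82 :: List.replicate M (0 : Int) := by
      have : (max_len + 1).toNat = M + 1 := by omega
      rw [this, List.replicate_succ, List.set_cons_zero]
    have hinit2 : (List.replicate (max_len + 1).toNat (0 : Int)).set 0 1
        = 1 :: List.replicate M (0 : Int) := by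
      have : (max_len + 1).toNat = M + 1 := by omega
      rw [this, List.replicate_succ, List.set_cons_zero]
    rw [hinit, hinit2]
    rw [pvScatterFold token_list M token_list.length (le_refl _) hle]
    have hpad : (max_len - (token_list.length : Int)).toNat = M - token_list.length := by omega
    simp only [List.take_length, List.foldl_append, List.foldl_cons, List.foldl_nil, pvStepA,
      pvFoldNum, pvFoldPad, hpad]
    simp
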